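-- pv_equiv track=rewrite | github.com/CallMeDas/Python-Practice-Set | PracticeSet-1/48_SumPrimeFactor.py | sumPrimeFactors
-- ===== SOURCE A (Python) =====
-- def sumPrimeFactors(n):
--     def isPrime(num):
--         if num < 2:
--             return False
--         for i in range(2, int(num**0.5) + 1):
--             if num % i == 0:
--                 return False
--         return True
--
--     prime_factors = []
--     for i in range(2, n + 1):
--         if n % i == 0 and isPrime(i):
--             prime_factors.append(i)
--
--     return sum(prime_factors)
-- ===== SOURCE B (Python) =====
-- def sumPrimeFactors(n):
--     # Trial division up to sqrt(m), dividing out each found prime factor: O(sqrt n).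
--     if n < 2:
--         return 0
--     total = 0
--     m = n
--     d = 2
--     while d * d <= m:
--         if m % d == 0:
--             total += d
--             while m % d == 0:
--                 m //= d
--         d += 1
--     if m > 1:
--         total += m
--     return total
-- ===== Notes on version B (the rewrite author's own statement) =====
-- stated objective: faster
-- what changed: Replaced the scan of all i in [2..n] with a primality test each (itself a trial-division loop) by a single trial division up to sqrt(m) that divides out each found prime factor and adds the remaining cofactor if > 1.
import Mathlib
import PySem

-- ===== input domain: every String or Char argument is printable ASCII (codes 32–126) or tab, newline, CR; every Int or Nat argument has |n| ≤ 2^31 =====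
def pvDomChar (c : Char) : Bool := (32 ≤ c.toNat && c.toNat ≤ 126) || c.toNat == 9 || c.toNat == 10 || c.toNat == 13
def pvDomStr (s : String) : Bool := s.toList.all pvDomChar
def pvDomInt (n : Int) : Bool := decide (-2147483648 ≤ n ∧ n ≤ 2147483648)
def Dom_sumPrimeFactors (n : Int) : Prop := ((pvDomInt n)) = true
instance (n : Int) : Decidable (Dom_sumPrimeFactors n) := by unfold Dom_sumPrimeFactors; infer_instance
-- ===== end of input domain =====

-- B replaces A's scan of all i in [2..n] (each with its own trial-division primality test)
-- by a single trial division up to sqrt(m) that divides out each found prime factor; faster (asymptotic, measured).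


-- ===== PORT A =====
-- int(num**0.5) is ported as Nat.sqrt: exact for the arguments it receives here (0 ≤ num ≤ 2^31,
-- where the double sqrt floors to the integer square root).
def pyIsPrime (num : Int) : Bool :=
  if num < 2 then false
  else (PySem.List.pyRange 2 (((Nat.sqrt num.toNat : Nat) : Int) + 1) 1).all
        (fun i => !(PySem.Int.mod num i == 0))

def sumPrimeFactors (n : Int) : Int :=
  ((PySem.List.pyRange 2 (n + 1) 1).foldl
      (fun acc i => if PySem.Int.mod n i == 0 && pyIsPrime i then acc ++ [i] else acc)
      []).sum

-- ===== PORT B =====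
-- `while m % d == 0: m //= d` (all values nonnegative, so Nat division is Python's //)
def altDivOut (m d : Nat) : Nat :=
  if h : 2 ≤ d ∧ 0 < m ∧ m % d = 0 then altDivOut (m / d) d else m
termination_by m
decreasing_by exact Nat.div_lt_self h.2.1 (by omega)

theorem altDivOut_le (m d : Nat) : altDivOut m d ≤ m := by
  fun_induction altDivOut with
  | case1 m h ih => exact le_trans ih (Nat.div_le_self _ _)
  | case2 m h => exact le_refl m

-- the outer `while d * d <= m` loop of Source B
def altLoop (m d total : Nat) : Nat :=
  if h : d * d ≤ m then
    if m % d = 0 then altLoop (altDivOut m d) (d + 1) (total + d)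
    else altLoop m (d + 1) total
  else if 1 < m then total + m else total
termination_by m + 1 - d
decreasing_by
  · have h1 : altDivOut m d ≤ m := altDivOut_le m d
    have h2 : d ≤ d * d := by
      rcases Nat.eq_zero_or_pos d with h0 | h0
      · simp [h0]
      · exact Nat.le_mul_of_pos_left d h0
    omega
  · have h2 : d ≤ d * d := by
      rcases Nat.eq_zero_or_pos d with h0 | h0
      · simp [h0]
      · exact Nat.le_mul_of_pos_left d h0
    omega

def sumPrimeFactors_alt (n : Int) : Int :=
  if n < 2 then 0 else ((altLoop n.toNat 2 0 : Nat) : Int)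

-- ===== PRECONDITION & SPEC =====
def Spec_sumPrimeFactors (n : Int) (out : Int) : Prop := out = sumPrimeFactors_alt n
instance (n : Int) (out : Int) : Decidable (Spec_sumPrimeFactors n out) := by unfold Spec_sumPrimeFactors; infer_instance

-- ===== CLAIM (what is proved, stated in full; the proofs are below) =====
def Claim_equal_sumPrimeFactors : Prop := ∀ (n : Int), Dom_sumPrimeFactors n → Spec_sumPrimeFactors n (sumPrimeFactors n)

-- ===== LEMMAS AND PROOFS =====

theorem altDivOut_pos (m d : Nat) (hm : 0 < m) : 0 < altDivOut m d := by
  induction m using Nat.strong_induction_on with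
  | _ m ih =>
    rw [altDivOut]
    split
    · next h =>
      have hd2 : 2 ≤ d := h.1
      have hdvd : d ∣ m := Nat.dvd_of_mod_eq_zero h.2.2
      exact ih (m / d) (Nat.div_lt_self hm (by omega))
        (Nat.div_pos (Nat.le_of_dvd hm hdvd) (by omega))
    · exact hm

theorem altDivOut_not_dvd (m d : Nat) (hd : 2 ≤ d) (hm : 0 < m) : ¬ d ∣ altDivOut m d := by
  induction m using Nat.strong_induction_on with
  | _ m ih =>
    rw [altDivOut]
    split
    · next h =>
      have hdvd : d ∣ m := Nat.dvd_of_mod_eq_zero h.2.2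
      exact ih (m / d) (Nat.div_lt_self hm (by omega))
        (Nat.div_pos (Nat.le_of_dvd hm hdvd) (by omega))
    · next h =>
      intro hdvd
      exact h ⟨hd, hm, Nat.mod_eq_zero_of_dvd hdvd⟩

theorem altDivOut_dvd_iff (m d : Nat) (hd : d.Prime) (hm : 0 < m)
    (p : Nat) (hp : p.Prime) (hne : p ≠ d) : p ∣ altDivOut m d ↔ p ∣ m := by
  induction m using Nat.strong_induction_on with
  | _ m ih =>
    rw [altDivOut]
    split
    · next h =>
      have hddvd : d ∣ m := Nat.dvd_of_mod_eq_zero h.2.2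
      have hpos : 0 < m / d := Nat.div_pos (Nat.le_of_dvd hm hddvd) (by omega)
      rw [ih (m / d) (Nat.div_lt_self hm (by omega)) hpos]
      constructor
      · intro hpd; exact dvd_trans hpd (Nat.div_dvd_of_dvd hddvd)
      · intro hpm
        have hcop : Nat.Coprime p d := (Nat.coprime_primes hp hd).mpr hne
        have hmul : p ∣ (m / d) * d := by rwa [Nat.div_mul_cancel hddvd]
        exact (Nat.Coprime.dvd_of_dvd_mul_right hcop) hmul
    · exact Iff.rfl

theorem primeFactors_altDivOut (m d : Nat) (hd : d.Prime) (hm : 0 < m) (hdvd : d ∣ m) :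
    m.primeFactors = insert d (altDivOut m d).primeFactors := by
  ext p
  simp only [Nat.mem_primeFactors, Finset.mem_insert]
  constructor
  · rintro ⟨hp, hpm, -⟩
    by_cases hne : p = d
    · exact Or.inl hne
    · exact Or.inr ⟨hp, (altDivOut_dvd_iff m d hd hm p hp hne).mpr hpm,
        (altDivOut_pos m d hm).ne'⟩
  · rintro (rfl | ⟨hp, hpm, -⟩)
    · exact ⟨hd, hdvd, by omega⟩
    · by_cases hne : p = d
      · exact ⟨hne ▸ hd, hne ▸ hdvd, by omega⟩
      · exact ⟨hp, (altDivOut_dvd_iff m d hd hm p hp hne).mp hpm, by omega⟩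

theorem altLoop_spec (m d total : Nat) :
    2 ≤ d → 0 < m → (∀ p, p.Prime → p ∣ m → d ≤ p) →
    altLoop m d total = total + ∑ p ∈ m.primeFactors, p := by
  fun_induction altLoop m d total with
  | case1 m d total h hmod ih =>
    intro hd hm hfac
    have hdvd : d ∣ m := Nat.dvd_of_mod_eq_zero hmod
    have hdp : d.Prime := by
      have hmfp : (Nat.minFac d).Prime := Nat.minFac_prime (by omega)
      have h2 : d ≤ Nat.minFac d := hfac _ hmfp (dvd_trans (Nat.minFac_dvd d) hdvd)
      have h3 : Nat.minFac d ≤ d := Nat.minFac_le (by omega)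
      exact Nat.prime_def_minFac.mpr ⟨hd, by omega⟩
    have hpos : 0 < altDivOut m d := altDivOut_pos m d hm
    have hnd : ¬ d ∣ altDivOut m d := altDivOut_not_dvd m d hd hm
    have hfac' : ∀ p, p.Prime → p ∣ altDivOut m d → d + 1 ≤ p := by
      intro p hp hpd
      by_cases hne : p = d
      · exact absurd (hne ▸ hpd) hnd
      · have := hfac p hp ((altDivOut_dvd_iff m d hdp hm p hp hne).mp hpd)
        omega
    rw [ih (by omega) hpos hfac']
    have hdnot : d ∉ (altDivOut m d).primeFactors := by
      simp only [Nat.mem_primeFactors]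
      rintro ⟨-, h2, -⟩; exact hnd h2
    rw [primeFactors_altDivOut m d hdp hm hdvd, Finset.sum_insert hdnot]
    omega
  | case2 m d total h hmod ih =>
    intro hd hm hfac
    refine ih (by omega) hm ?_
    intro p hp hpd
    have h1 := hfac p hp hpd
    rcases Nat.lt_or_ge d p with h' | h'
    · omega
    · have hpe : p = d := by omega
      subst hpe
      exact absurd (Nat.mod_eq_zero_of_dvd hpd) hmod
  | case3 m d total h hm1' =>
    intro hd hm hfac
    have hmp : m.Prime := by
      have hm1 : m ≠ 1 := by omega
      by_contra hnp
      have h2 := Nat.minFac_sq_le_self hm hnp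
      have hmfp : (Nat.minFac m).Prime := Nat.minFac_prime hm1
      have h3 : d ≤ Nat.minFac m := hfac _ hmfp (Nat.minFac_dvd m)
      have h4 : d * d ≤ Nat.minFac m * Nat.minFac m := Nat.mul_le_mul h3 h3
      rw [pow_two] at h2
      exact h (le_trans h4 h2)
    rw [hmp.primeFactors, Finset.sum_singleton]
  | case4 m d total h hm1' =>
    intro hd hm hfac
    have hm1 : m = 1 := by omega
    subst hm1
    simp

theorem alt_eq_sum (n : Int) (hn : 2 ≤ n) :
    sumPrimeFactors_alt n = ((∑ p ∈ (n.toNat).primeFactors, p : Nat) : Int) := by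
  rw [sumPrimeFactors_alt, if_neg (by omega)]
  rw [altLoop_spec n.toNat 2 0 (le_refl 2) (by omega) (fun p hp _ => hp.two_le)]
  simp

theorem pyIsPrime_iff (i : Int) (hi : 2 ≤ i) : pyIsPrime i = true ↔ Nat.Prime i.toNat := by
  have hiN : ((i.toNat : Nat) : Int) = i := Int.toNat_of_nonneg (by omega)
  rw [pyIsPrime, if_neg (by omega), List.all_eq_true, Nat.prime_def_le_sqrt]
  constructor
  · intro hall
    refine ⟨by omega, fun q hq hqs hdvd => ?_⟩
    have hmem : (q : Int) ∈ PySem.List.pyRange 2 (((Nat.sqrt i.toNat : Nat) : Int) + 1) 1 :=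
      (PySem.List.mem_pyRange_one).mpr ⟨by exact_mod_cast hq, by omega⟩
    have h2 := hall _ hmem
    simp only [Bool.not_eq_true', beq_eq_false_iff_ne, ne_eq] at h2
    apply h2
    rw [PySem.Int.mod_eq_zero_iff_dvd]
    rw [← hiN]
    exact_mod_cast hdvd
  · rintro ⟨-, hforall⟩ x hx
    rw [PySem.List.mem_pyRange_one] at hx
    simp only [Bool.not_eq_true', beq_eq_false_iff_ne, ne_eq]
    intro hmod
    have hxd : x ∣ i := (PySem.Int.mod_eq_zero_iff_dvd i x).mp hmod
    have hxN : ((x.toNat : Nat) : Int) = x := Int.toNat_of_nonneg (by omega)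
    refine hforall x.toNat (by omega) (by omega) ?_
    rw [← Int.natCast_dvd_natCast, hxN, hiN]
    exact hxd

theorem a_eq_sum (n : Int) (hn : 2 ≤ n) :
    sumPrimeFactors n = ((∑ p ∈ (n.toNat).primeFactors, p : Nat) : Int) := by
  have hnN : ((n.toNat : Nat) : Int) = n := Int.toNat_of_nonneg (by omega)
  rw [sumPrimeFactors, PySem.List.foldl_append_if_eq_filter, List.nil_append]
  have hnd : ((PySem.List.pyRange 2 (n + 1) 1).filter
      (fun i => PySem.Int.mod n i == 0 && pyIsPrime i)).Nodup :=
    (PySem.List.nodup_pyRange_one _ _).filter _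
  have hmap := List.sum_toFinset (id : Int → Int) hnd
  rw [List.map_id] at hmap
  rw [← hmap]
  have hset : ((PySem.List.pyRange 2 (n + 1) 1).filter
      (fun i => PySem.Int.mod n i == 0 && pyIsPrime i)).toFinset =
      (n.toNat).primeFactors.map ⟨(Nat.cast : Nat → Int), (Nat.cast_injective : Function.Injective (Nat.cast : Nat → Int))⟩ := by
    ext x
    rw [List.mem_toFinset, List.mem_filter, PySem.List.mem_pyRange_one, Finset.mem_map]
    simp only [Bool.and_eq_true, beq_iff_eq, Function.Embedding.coeFn_mk]
    constructor
    · rintro ⟨⟨hx2, hxn⟩, hmod, hprime⟩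
      have hxN : ((x.toNat : Nat) : Int) = x := Int.toNat_of_nonneg (by omega)
      refine ⟨x.toNat, ?_, hxN⟩
      rw [Nat.mem_primeFactors]
      refine ⟨(pyIsPrime_iff x (by omega)).mp hprime, ?_, by omega⟩
      rw [← Int.natCast_dvd_natCast, hxN, hnN]
      exact (PySem.Int.mod_eq_zero_iff_dvd n x).mp hmod
    · rintro ⟨q, hq, rfl⟩
      rw [Nat.mem_primeFactors] at hq
      obtain ⟨hqp, hqd, -⟩ := hq
      have hq2 : 2 ≤ q := hqp.two_le
      have hqn : (q : Int) ≤ n := by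
        rw [← hnN]; exact_mod_cast Nat.le_of_dvd (by omega) hqd
      refine ⟨⟨by exact_mod_cast hq2, by omega⟩, ?_, ?_⟩
      · rw [PySem.Int.mod_eq_zero_iff_dvd, ← hnN]
        exact_mod_cast hqd
      · rw [pyIsPrime_iff _ (by exact_mod_cast hq2)]
        simpa using hqp
  rw [hset, Finset.sum_map]
  simp only [Function.Embedding.coeFn_mk, id]
  rw [← Nat.cast_sum]

-- ===== VERDICT (by name: the statement is the Claim_ definition above) =====
theorem sumPrimeFactors_spec : Claim_equal_sumPrimeFactors := by
  intro n _
  unfold Spec_sumPrimeFactors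
  by_cases hn : n < 2
  · rw [sumPrimeFactors, sumPrimeFactors_alt, if_pos hn,
      PySem.List.pyRange_one_eq_nil (by omega)]
    rfl
  · rw [a_eq_sum n (by omega), alt_eq_sum n (by omega)]
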